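-- pv_equiv track=rewrite | github.com/angusbarnes/intercepts | old.py | group_contiguous_intervals
-- ===== SOURCE A (Python) =====
-- def group_contiguous_intervals(intervals):
--     groups = []
--     current_group = []
--
--     for interval in intervals:
--         if not current_group:
--             current_group.append(interval)
--         else:
--             last_interval = current_group[-1]
--             if last_interval[3] == interval[2]:
--                 current_group.append(interval)
--             else:
--                 groups.append(current_group)
--                 current_group = [interval]
--
--     if current_group:
--         groups.append(current_group)
--
--     return groups
-- ===== SOURCE B (Python) =====
-- def group_contiguous_intervals(intervals):
--     groups = []
--     for interval in reversed(intervals):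
--         if groups and interval[3] == groups[0][0][2]:
--             groups[0] = [interval] + groups[0]
--         else:
--             groups = [[interval]] + groups
--     return groups
-- ===== Notes on version B (the rewrite author's own statement) =====
-- stated objective: alternative
-- what changed: B builds the groups back-to-front with a single right-to-left pass that either prepends the interval to the first existing group or opens a new group, instead of A's left-to-right accumulator with a flush of the running group at the end.
import Mathlib
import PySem

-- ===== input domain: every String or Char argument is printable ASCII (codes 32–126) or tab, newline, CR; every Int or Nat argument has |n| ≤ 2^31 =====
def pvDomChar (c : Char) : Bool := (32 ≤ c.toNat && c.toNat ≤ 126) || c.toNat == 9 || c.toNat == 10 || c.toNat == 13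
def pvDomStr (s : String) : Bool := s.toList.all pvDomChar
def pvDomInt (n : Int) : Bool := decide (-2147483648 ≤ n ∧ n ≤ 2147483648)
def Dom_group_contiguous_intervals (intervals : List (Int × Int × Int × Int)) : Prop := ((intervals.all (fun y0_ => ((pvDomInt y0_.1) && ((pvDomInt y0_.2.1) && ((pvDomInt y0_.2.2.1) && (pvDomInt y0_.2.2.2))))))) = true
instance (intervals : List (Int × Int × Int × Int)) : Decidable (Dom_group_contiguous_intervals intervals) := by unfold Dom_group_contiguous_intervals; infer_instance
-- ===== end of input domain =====

-- B builds the groups back-to-front in one right-to-left pass (prepend to the first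
-- group or open a new one), instead of A's left-to-right accumulator with a final flush.

-- ===== PORT A =====
-- one loop step of A: state is (groups, current_group); current_group[-1] is taken
-- only in the branch where current_group is nonempty, so getLast! is exact there
def pvStepA (s : List (List (Int × Int × Int × Int)) × List (Int × Int × Int × Int))
    (interval : Int × Int × Int × Int) :
    List (List (Int × Int × Int × Int)) × List (Int × Int × Int × Int) :=
  match s with
  | (groups, []) => (groups, [interval])
  | (groups, c :: cs) =>
    let last_interval := (c :: cs).getLast!
    if last_interval.2.2.2 = interval.2.2.1 then
      (groups, (c :: cs) ++ [interval])
    else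
      (groups ++ [c :: cs], [interval])

def group_contiguous_intervals (intervals : List (Int × Int × Int × Int)) : List (List (Int × Int × Int × Int)) :=
  match intervals.foldl pvStepA ([], []) with
  | (groups, []) => groups
  | (groups, cur) => groups ++ [cur]

-- ===== PORT B =====
-- one loop step of B: the interval is prepended to the first group or opens a new group
def pvStepB (interval : Int × Int × Int × Int)
    (groups : List (List (Int × Int × Int × Int))) : List (List (Int × Int × Int × Int)) :=
  match groups with
  | (y :: g) :: rest =>
    if interval.2.2.2 = y.2.2.1 then (interval :: y :: g) :: rest
    else [interval] :: (y :: g) :: rest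
  | _ => [interval] :: groups

def group_contiguous_intervals_alt (intervals : List (Int × Int × Int × Int)) : List (List (Int × Int × Int × Int)) :=
  -- 'for interval in reversed(intervals)' with prepends = a right fold over intervals
  intervals.foldr pvStepB []

-- ===== PRECONDITION & SPEC =====
def Spec_group_contiguous_intervals (intervals : List (Int × Int × Int × Int)) (out : List (List (Int × Int × Int × Int))) : Prop := out = group_contiguous_intervals_alt intervals
instance (intervals : List (Int × Int × Int × Int)) (out : List (List (Int × Int × Int × Int))) : Decidable (Spec_group_contiguous_intervals intervals out) := by unfold Spec_group_contiguous_intervals; infer_instance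

-- ===== CLAIM (what is proved, stated in full; the proofs are below) =====
def Claim_equal_group_contiguous_intervals : Prop := ∀ (intervals : List (Int × Int × Int × Int)), Dom_group_contiguous_intervals intervals → Spec_group_contiguous_intervals intervals (group_contiguous_intervals intervals)

-- ===== LEMMAS AND PROOFS =====

-- merging a nonempty open group 'cur' into the front of an already-built grouping
def pvCons (cur : List (Int × Int × Int × Int))
    (groups : List (List (Int × Int × Int × Int))) : List (List (Int × Int × Int × Int)) :=
  match groups with
  | (y :: g) :: rest =>
    if cur.getLast!.2.2.2 = y.2.2.1 then (cur ++ y :: g) :: rest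
    else cur :: (y :: g) :: rest
  | _ => [cur]

-- every grouping B produces is either empty or starts with a nonempty group
theorem pvAlt_shape (xs : List (Int × Int × Int × Int)) :
    xs.foldr pvStepB [] = [] ∨
      ∃ y g rest, xs.foldr pvStepB [] = (y :: g) :: rest := by
  induction xs with
  | nil => exact Or.inl rfl
  | cons x xs ih =>
    right
    rcases ih with h | ⟨y, g, rest, h⟩
    · exact ⟨x, [], [], by simp [h, pvStepB]⟩
    · by_cases hxy : x.2.2.2 = y.2.2.1
      · exact ⟨x, y :: g, rest, by simp [h, pvStepB, hxy]⟩
      · exact ⟨x, [], (y :: g) :: rest, by simp [h, pvStepB, hxy]⟩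

-- the carry lemma: A's state after xs, flushed, = groups ++ (cur merged into B's grouping of xs)
theorem pvGo_eq (xs : List (Int × Int × Int × Int)) :
    ∀ (groups : List (List (Int × Int × Int × Int)))
      (cur : List (Int × Int × Int × Int)), cur ≠ [] →
      (match xs.foldl pvStepA (groups, cur) with
        | (gs, []) => gs
        | (gs, c) => gs ++ [c]) = groups ++ pvCons cur (xs.foldr pvStepB []) := by
  induction xs with
  | nil =>
    intro groups cur hc
    match cur, hc with
    | c :: cs, _ => simp [pvCons]
  | cons x xs ih =>
    intro groups cur hc
    match cur, hc with
    | c :: cs, _ =>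
      rw [List.foldl_cons, List.foldr_cons]
      by_cases hcond : ((c :: cs).getLast?.getD default).2.2.2 = x.2.2.1
      · have hstep : pvStepA (groups, c :: cs) x = (groups, (c :: cs) ++ [x]) := by
          simp [pvStepA, hcond]
        rw [hstep, ih groups ((c :: cs) ++ [x]) (by simp)]
        rcases pvAlt_shape xs with h | ⟨y, g, rest, h⟩
        · simp [h, pvCons, pvStepB, hcond]
        · have hl : ((c :: (cs ++ [x])).getLast?.getD (default : Int × Int × Int × Int)) = x := by
            rw [← List.cons_append, List.getLast?_concat]
            rfl
          by_cases hxy : x.2.2.2 = y.2.2.1 <;>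
            simp [h, pvCons, pvStepB, hxy, hcond, hl]
      · have hstep : pvStepA (groups, c :: cs) x = (groups ++ [c :: cs], [x]) := by
          simp [pvStepA, hcond]
        rw [hstep, ih (groups ++ [c :: cs]) [x] (by simp)]
        rcases pvAlt_shape xs with h | ⟨y, g, rest, h⟩
        · simp [h, pvCons, pvStepB, hcond]
        · by_cases hxy : x.2.2.2 = y.2.2.1 <;>
            simp [h, pvCons, pvStepB, hxy, hcond]

theorem pv_main (intervals : List (Int × Int × Int × Int)) :
    group_contiguous_intervals intervals = group_contiguous_intervals_alt intervals := by
  cases intervals with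
  | nil => rfl
  | cons x xs =>
    unfold group_contiguous_intervals group_contiguous_intervals_alt
    rw [List.foldl_cons, List.foldr_cons,
        show pvStepA ([], []) x = ([], [x]) from rfl,
        pvGo_eq xs [] [x] (by simp)]
    rcases pvAlt_shape xs with h | ⟨y, g, rest, h⟩
    · simp [h, pvCons, pvStepB]
    · by_cases hxy : x.2.2.2 = y.2.2.1 <;> simp [h, pvCons, pvStepB, hxy]

-- ===== VERDICT (by name: the statement is the Claim_ definition above) =====
theorem group_contiguous_intervals_spec : Claim_equal_group_contiguous_intervals := by
  intro intervals _
  unfold Spec_group_contiguous_intervals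
  exact pv_main intervals
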